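-- pv_equiv track=rewrite | github.com/marcelcata/aoc_2023 | day12/day12.py | sequence_is_possible
-- ===== SOURCE A (Python) =====
-- import copy
--
-- def sequence_is_possible(sequence, expected_pattern):
--     """Returns true if there is a combination that is correct."""
--     if sum(elem in ["#", "?"] for elem in sequence) < sum(expected_pattern):
--         return False
--
--     if sum(elem in ["#", "?"] for elem in sequence) == sum(expected_pattern):
--         sequence = copy.copy(sequence)
--         for i, elem in enumerate(sequence):
--             if elem == "?":
--                 sequence[i] == "#"
--
--     seq_pattern = []
--     damaged_in_a_row = 0
--
--     for element in sequence:
--         if element == "#":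
--             damaged_in_a_row += 1
--         elif element == "?":
--             break
--         else:
--             if damaged_in_a_row > 0:
--                 seq_pattern.append(damaged_in_a_row)
--                 damaged_in_a_row = 0
--     if damaged_in_a_row > 0:
--         seq_pattern.append(damaged_in_a_row)
--
--     if len(seq_pattern) == 0:
--         return True
--
--     if len(seq_pattern) > len(expected_pattern):
--        return False
--
--     for found, expected in zip(seq_pattern[:-1], expected_pattern[:len(seq_pattern) - 1]):
--         if found != expected:
--             return False
--
--     if seq_pattern[-1] <= expected_pattern[len(seq_pattern) - 1]:
--         return True
--     return False
-- ===== SOURCE B (Python) =====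
-- def _hash_runs(seq):
--     """Lengths of maximal runs of "#", extracted recursively front-to-back."""
--     if not seq:
--         return []
--     if seq[0] != "#":
--         return _hash_runs(seq[1:])
--     k = 1
--     while k < len(seq) and seq[k] == "#":
--         k += 1
--     return [k] + _hash_runs(seq[k:])
--
--
-- def sequence_is_possible(sequence, expected_pattern):
--     """Returns true if there is a combination that is correct."""
--     if sum(e in ("#", "?") for e in sequence) < sum(expected_pattern):
--         return False
--     prefix = sequence[:sequence.index("?")] if "?" in sequence else sequence
--     runs = _hash_runs(prefix)
--     if not runs:
--         return True
--     if len(runs) > len(expected_pattern):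
--         return False
--     return (runs[:-1] == expected_pattern[:len(runs) - 1]
--             and runs[-1] <= expected_pattern[len(runs) - 1])
-- ===== Notes on version B (the rewrite author's own statement) =====
-- stated objective: alternative
-- what changed: A's single stateful scan (damaged-run counter, break at '?', early-return zip loop) is replaced by slicing the sequence at the first '?' via index(), extracting run lengths with a recursive front-to-back helper using an inner maximal-run count, and comparing via list slices and one boolean expression.
import Mathlib
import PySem

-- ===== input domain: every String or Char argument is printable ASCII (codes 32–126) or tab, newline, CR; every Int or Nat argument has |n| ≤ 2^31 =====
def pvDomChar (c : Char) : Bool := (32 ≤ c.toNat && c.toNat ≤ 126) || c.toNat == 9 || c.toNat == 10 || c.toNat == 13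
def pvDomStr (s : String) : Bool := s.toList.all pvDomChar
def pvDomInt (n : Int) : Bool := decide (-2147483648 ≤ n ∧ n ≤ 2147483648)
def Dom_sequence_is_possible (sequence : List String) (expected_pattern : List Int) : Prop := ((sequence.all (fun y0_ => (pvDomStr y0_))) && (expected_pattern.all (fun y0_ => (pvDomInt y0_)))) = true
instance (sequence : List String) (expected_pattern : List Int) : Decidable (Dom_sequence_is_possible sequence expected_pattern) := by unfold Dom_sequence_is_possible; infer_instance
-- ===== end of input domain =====

-- B replaces A's stateful break-out scan and early-return zip loop by an explicit
-- '?'-prefix slice, a recursive front-to-back run extractor, and slice comparisons (alternative decomposition, same cost).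


-- ===== PORT A =====
-- sum(elem in ["#","?"] for elem in sequence)
def pvSumCount (sequence : List String) : Int :=
  sequence.foldl (fun a e => a + (if e = "#" ∨ e = "?" then (1 : Int) else 0)) 0

-- sum(expected_pattern)
def pvSumInt (xs : List Int) : Int := xs.foldl (· + ·) 0

-- A's main loop: damaged_in_a_row accumulator, break at "?", trailing append folded in
def pvALoop : List String → Int → List Int → List Int
  | [], d, acc => if d > 0 then acc ++ [d] else acc
  | e :: rest, d, acc =>
    if e = "#" then pvALoop rest (d + 1) acc
    else if e = "?" then (if d > 0 then acc ++ [d] else acc)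
    else pvALoop rest 0 (if d > 0 then acc ++ [d] else acc)

-- A's zip loop: returns false at the first mismatching pair (zip truncates to the shorter list)
def pvAZip : List Int → List Int → Bool
  | f :: fs, e :: es => if f ≠ e then false else pvAZip fs es
  | _, _ => true

def sequence_is_possible (sequence : List String) (expected_pattern : List Int) : Bool :=
  if pvSumCount sequence < pvSumInt expected_pattern then false
  else
    -- A's equality-count branch only runs `sequence[i] == "#"`, a discarded comparison: no effect
    let seq_pattern := pvALoop sequence 0 []
    if seq_pattern.length = 0 then true
    else if seq_pattern.length > expected_pattern.length then false
    else if pvAZip seq_pattern.dropLast (expected_pattern.take (seq_pattern.length - 1)) = false then false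
    else decide (PySem.List.pyGetD seq_pattern (-1) 0 ≤
                 PySem.List.pyGetD expected_pattern ((seq_pattern.length : Int) - 1) 0)

-- ===== PORT B =====
-- inner while: number of leading "#" elements
def pvCountLead : List String → Nat
  | [] => 0
  | e :: r => if e = "#" then pvCountLead r + 1 else 0

-- _hash_runs: recursive extraction of maximal "#"-run lengths, front to back
def pvHashRuns : List String → List Int
  | [] => []
  | e :: rest =>
    if e = "#" then ((1 + pvCountLead rest : Nat) : Int) :: pvHashRuns (rest.drop (pvCountLead rest))
    else pvHashRuns rest
termination_by s => s.length
decreasing_by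
  · simp only [List.length_drop, List.length_cons]; omega
  · simp only [List.length_cons]; omega

-- sequence[:sequence.index("?")] if "?" in sequence else sequence
def pvBPrefix (sequence : List String) : List String :=
  match PySem.List.index? sequence "?" with
  | some i => sequence.take i
  | none => sequence

def sequence_is_possible_alt (sequence : List String) (expected_pattern : List Int) : Bool :=
  if pvSumCount sequence < pvSumInt expected_pattern then false
  else
    let runs := pvHashRuns (pvBPrefix sequence)
    if runs = [] then true
    else if runs.length > expected_pattern.length then false
    else decide (runs.dropLast = expected_pattern.take (runs.length - 1)) &&
         decide (PySem.List.pyGetD runs (-1) 0 ≤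
                 PySem.List.pyGetD expected_pattern ((runs.length : Int) - 1) 0)

-- ===== PRECONDITION & SPEC =====
def Spec_sequence_is_possible (sequence : List String) (expected_pattern : List Int) (out : Bool) : Prop := out = sequence_is_possible_alt sequence expected_pattern
instance (sequence : List String) (expected_pattern : List Int) (out : Bool) : Decidable (Spec_sequence_is_possible sequence expected_pattern out) := by unfold Spec_sequence_is_possible; infer_instance

-- ===== CLAIM (what is proved, stated in full; the proofs are below) =====
def Claim_equal_sequence_is_possible : Prop := ∀ (sequence : List String) (expected_pattern : List Int), Dom_sequence_is_possible sequence expected_pattern → Spec_sequence_is_possible sequence expected_pattern (sequence_is_possible sequence expected_pattern)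

-- ===== LEMMAS AND PROOFS =====

theorem pvBPrefix_eq_takeWhile (s : List String) :
    pvBPrefix s = s.takeWhile (fun e => !(e == "?")) := by
  induction s with
  | nil => rfl
  | cons e rest ih =>
    by_cases he : e = "?"
    · subst he
      rw [pvBPrefix, PySem.List.index?_cons_self]
      simp [List.takeWhile]
    · have hb : (!(e == "?")) = true := by simp [he]
      rw [pvBPrefix, PySem.List.index?_cons_of_ne rest he]
      rw [pvBPrefix] at ih
      rw [List.takeWhile_cons, hb, ← ih]
      cases h : PySem.List.index? rest "?" with
      | none => simp
      | some i => simp [List.take_succ_cons]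

theorem pvCountLead_replicate (k : Nat) (t : List String) :
    pvCountLead (List.replicate k "#" ++ t) = k + pvCountLead t := by
  induction k with
  | zero => simp
  | succ n ih => simp [List.replicate_succ, pvCountLead, ih]; omega

theorem pvHashRuns_replicate (k : Nat) (t : List String)
    (ht : t = [] ∨ ∃ e r, t = e :: r ∧ e ≠ "#") :
    pvHashRuns (List.replicate k "#" ++ t) =
      if k = 0 then pvHashRuns t else ((k : Int) :: pvHashRuns t) := by
  have hct : pvCountLead t = 0 := by
    rcases ht with h | ⟨e, r, h, he⟩ <;> subst h <;> simp [pvCountLead, *]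
  cases k with
  | zero => simp
  | succ n =>
    rw [List.replicate_succ, List.cons_append, pvHashRuns]
    rw [if_pos rfl, pvCountLead_replicate, hct, Nat.add_zero]
    have hdrop : (List.replicate n "#" ++ t).drop n = t := by
      rw [List.drop_left' (by simp)]
    rw [hdrop]
    simp; omega

theorem pvALoop_eq_runs (s : List String) : ∀ (d : Nat) (acc : List Int),
    pvALoop s (d : Int) acc =
      acc ++ pvHashRuns (List.replicate d "#" ++ s.takeWhile (fun e => !(e == "?"))) := by
  induction s with
  | nil =>
    intro d acc
    rw [pvALoop, List.takeWhile_nil, pvHashRuns_replicate d [] (Or.inl rfl)]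
    rcases Nat.eq_zero_or_pos d with h | h
    · subst h; simp [pvHashRuns]
    · rw [if_pos (by exact_mod_cast h), if_neg (by omega)]
      simp [pvHashRuns]
  | cons e rest ih =>
    intro d acc
    by_cases hh : e = "#"
    · subst hh
      rw [pvALoop, if_pos rfl]
      have : ((d : Int) + 1) = ((d + 1 : Nat) : Int) := by push_cast; ring
      rw [this, ih (d + 1) acc]
      have : List.replicate d ("#" : String) ++ (("#" : String) :: rest).takeWhile (fun e => !(e == "?"))
           = List.replicate (d + 1) ("#" : String) ++ rest.takeWhile (fun e => !(e == "?")) := by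
        rw [List.takeWhile_cons_of_pos (by decide), List.replicate_succ' (n := d)]
        simp
      rw [this]
    · by_cases hq : e = "?"
      · subst hq
        rw [pvALoop, if_neg (by simp), if_pos rfl]
        rw [List.takeWhile_cons_of_neg (by simp), pvHashRuns_replicate d [] (Or.inl rfl)]
        rcases Nat.eq_zero_or_pos d with h | h
        · subst h; simp [pvHashRuns]
        · rw [if_pos (by exact_mod_cast h), if_neg (by omega)]
          simp [pvHashRuns]
      · have ihh := ih 0 (if (d : Int) > 0 then acc ++ [(d : Int)] else acc)
        rw [Nat.cast_zero] at ihh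
        rw [pvALoop, if_neg hh, if_neg hq, ihh]
        rw [List.takeWhile_cons_of_pos (by simp [hq]),
            pvHashRuns_replicate d _ (Or.inr ⟨e, _, rfl, hh⟩)]
        have hre : pvHashRuns (e :: rest.takeWhile (fun e => !(e == "?")))
                 = pvHashRuns (rest.takeWhile (fun e => !(e == "?"))) := by
          rw [pvHashRuns, if_neg hh]
        rcases Nat.eq_zero_or_pos d with h | h
        · subst h; simp [hre]
        · rw [if_pos (by exact_mod_cast h), if_neg (by omega), hre]
          simp

theorem pvALoop_runs (s : List String) :
    pvALoop s 0 [] = pvHashRuns (pvBPrefix s) := by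
  have := pvALoop_eq_runs s 0 []
  simpa [pvBPrefix_eq_takeWhile] using this

theorem pvAZip_eq_decide : ∀ (xs ys : List Int), xs.length = ys.length →
    pvAZip xs ys = decide (xs = ys) := by
  intro xs
  induction xs with
  | nil => intro ys h; cases ys <;> simp_all [pvAZip]
  | cons f fs ih =>
    intro ys h
    cases ys with
    | nil => simp at h
    | cons e es =>
      rw [pvAZip]
      by_cases hfe : f = e
      · subst hfe
        rw [if_neg (by simp)]
        rw [ih es (by simpa using h)]
        simp
      · simp [hfe]

-- ===== VERDICT (by name: the statement is the Claim_ definition above) =====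
theorem sequence_is_possible_spec : Claim_equal_sequence_is_possible := by
  intro s e _
  unfold Spec_sequence_is_possible sequence_is_possible sequence_is_possible_alt
  by_cases hg : pvSumCount s < pvSumInt e
  · simp [hg]
  · rw [if_neg hg, if_neg hg, pvALoop_runs]
    set r := pvHashRuns (pvBPrefix s) with hr
    by_cases hnil : r = []
    · simp [hnil]
    · rw [if_neg (by simp [hnil]), if_neg hnil]
      by_cases hlen : r.length > e.length
      · simp [hlen]
      · rw [if_neg hlen, if_neg hlen]
        have hlens : r.dropLast.length = (e.take (r.length - 1)).length := by
          simp [List.length_dropLast, List.length_take]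
          omega
        rw [pvAZip_eq_decide _ _ hlens]
        by_cases heq : r.dropLast = e.take (r.length - 1)
        · simp [heq]
        · simp [heq]
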